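-- pv_equiv track=rewrite | github.com/mkierin/assistant-brain-os | common/knowledge_graph.py | _parse_tag_hierarchy
-- ===== SOURCE A (Python) =====
-- from typing import List, Dict, Optional, Tuple
--
-- def _parse_tag_hierarchy(tag: str) -> List[str]:
--     """
--     Parse hierarchical tag like 'ai/ml/nlp' into all levels.
--     Returns: ['ai', 'ai/ml', 'ai/ml/nlp']
--     """
--     if '/' not in tag:
--         return [tag]
--
--     parts = tag.split('/')
--     hierarchy = []
--     for i in range(len(parts)):
--         hierarchy.append('/'.join(parts[:i+1]))
--
--     return hierarchy
-- ===== SOURCE B (Python) =====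
-- from typing import List
--
--
-- def _parse_tag_hierarchy(tag: str) -> List[str]:
--     """Expand a hierarchical tag into all its path prefixes, using a single
--     running-prefix accumulator instead of re-slicing and re-joining."""
--     hierarchy = []
--     prefix = ""
--     for part in tag.split('/'):
--         prefix = part if not hierarchy else prefix + '/' + part
--         hierarchy.append(prefix)
--     return hierarchy
-- ===== Notes on version B (the rewrite author's own statement) =====
-- stated objective: simpler
-- what changed: Replace the index loop that re-slices and re-joins a growing prefix each iteration by a single pass over the split parts keeping one running prefix string, and drop the redundant separator-membership guard.
import Mathlib
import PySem

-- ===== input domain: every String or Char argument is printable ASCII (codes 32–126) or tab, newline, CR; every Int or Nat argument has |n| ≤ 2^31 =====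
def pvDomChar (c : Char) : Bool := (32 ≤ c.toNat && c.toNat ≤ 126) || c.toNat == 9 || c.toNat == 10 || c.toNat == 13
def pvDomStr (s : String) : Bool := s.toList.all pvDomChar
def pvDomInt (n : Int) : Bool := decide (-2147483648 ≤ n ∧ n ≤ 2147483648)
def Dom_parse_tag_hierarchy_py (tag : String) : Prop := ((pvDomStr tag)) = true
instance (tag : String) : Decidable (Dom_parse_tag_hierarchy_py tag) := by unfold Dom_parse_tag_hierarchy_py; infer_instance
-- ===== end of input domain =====

-- B replaces A's index loop (which re-slices parts[:i+1] and re-joins it each time)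
-- by one pass over the split parts with a single growing prefix accumulator; objective: simpler.


-- ===== PORT A =====
def parse_tag_hierarchy_py (tag : String) : List String :=
  if PySem.Str.isIn "/" tag = false then [tag]       -- if '/' not in tag: return [tag]
  else
    let parts := (PySem.Str.split? tag "/").getD []  -- sep "/" ≠ "", so split? is always `some`
    let hierarchy : List String := []
    let hierarchy := (PySem.List.pyRange 0 parts.length).foldl
      (fun h i => h ++ [PySem.Str.join "/" (PySem.List.slice parts none (some (i + 1)))])
      hierarchy
    hierarchy

-- ===== PORT B =====
def parse_tag_hierarchy_py_alt (tag : String) : List String :=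
  let parts := (PySem.Str.split? tag "/").getD []    -- sep "/" ≠ "", so split? is always `some`
  (parts.foldl
    (fun (st : List String × String) part =>
      -- prefix = part if not hierarchy else prefix + '/' + part  (concat via PySem.Str.join)
      let p := if st.1.isEmpty then part else PySem.Str.join "/" [st.2, part]
      (st.1 ++ [p], p))
    ([], "")).1

-- ===== PRECONDITION & SPEC =====
def Spec_parse_tag_hierarchy_py (tag : String) (out : List String) : Prop := out = parse_tag_hierarchy_py_alt tag
instance (tag : String) (out : List String) : Decidable (Spec_parse_tag_hierarchy_py tag out) := by unfold Spec_parse_tag_hierarchy_py; infer_instance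

-- ===== CLAIM (what is proved, stated in full; the proofs are below) =====
def Claim_equal_parse_tag_hierarchy_py : Prop := ∀ (tag : String), Dom_parse_tag_hierarchy_py tag → Spec_parse_tag_hierarchy_py tag (parse_tag_hierarchy_py tag)

-- ===== LEMMAS AND PROOFS =====

-- Both loops compute the list of joined prefixes of `parts`:
def pvPrefixes (parts : List String) : List String :=
  (List.range parts.length).map (fun k => PySem.Str.join "/" (parts.take (k + 1)))

-- `'/'.join` over a snoc: at the Chars level, then lifted to String.
theorem pv_chars_join_snoc (sep y : List Char) (l : List (List Char)) (h : l ≠ []) :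
    PySem.Chars.join sep (l ++ [y]) = PySem.Chars.join sep l ++ sep ++ y := by
  induction l with
  | nil => exact absurd rfl h
  | cons x r ih =>
    cases r with
    | nil => simp [PySem.Chars.join_singleton, PySem.Chars.join_cons_cons]
    | cons z r' =>
      have ih' := ih (by simp)
      rw [List.cons_append] at ih'
      rw [List.cons_append, PySem.Chars.join_cons_cons, List.cons_append,
        PySem.Chars.join_cons_cons, ih']
      simp [List.append_assoc]

theorem pv_str_join_snoc (q : List String) (y : String) (h : q ≠ []) :
    PySem.Str.join "/" [PySem.Str.join "/" q, y] = PySem.Str.join "/" (q ++ [y]) := by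
  apply String.toList_inj.mp
  rw [PySem.Str.toList_join, PySem.Str.toList_join]
  simp only [List.map_cons, List.map_nil, List.map_append]
  rw [PySem.Chars.join_cons_cons, PySem.Chars.join_singleton,
    pv_chars_join_snoc _ _ _ (show List.map String.toList q ≠ [] by simpa using h),
    PySem.Str.toList_join]

-- A's loop: fold over pyRange 0 n appending the joined slice = pvPrefixes.
theorem pv_a_loop (parts : List String) :
    (PySem.List.pyRange 0 parts.length).foldl
      (fun h i => h ++ [PySem.Str.join "/" (PySem.List.slice parts none (some (i + 1)))]) []
      = pvPrefixes parts := by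
  suffices h : ∀ (n : Nat) (acc : List String),
      (PySem.List.pyRange 0 n).foldl
        (fun h i => h ++ [PySem.Str.join "/" (PySem.List.slice parts none (some (i + 1)))]) acc
      = acc ++ (List.range n).map (fun k => PySem.Str.join "/" (parts.take (k + 1))) by
    simpa [pvPrefixes] using h parts.length []
  intro n
  induction n with
  | zero => intro acc; simp [PySem.List.pyRange]
  | succ m ih =>
    intro acc
    have hsplit : PySem.List.pyRange 0 (m + 1 : Nat) =
        PySem.List.pyRange 0 m ++ PySem.List.pyRange m (m + 1 : Nat) := by
      exact PySem.List.pyRange_one_append 0 m ((m : Int) + 1) (by positivity) (by omega)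
    have hone : PySem.List.pyRange (m : Int) ((m : Int) + 1) = [(m : Int)] := by
      rw [PySem.List.pyRange_one_cons (by omega)]
      simp [PySem.List.pyRange]
    push_cast at hsplit ⊢
    rw [hsplit, hone, List.foldl_append, ih acc, List.range_succ, List.map_append]
    simp only [List.foldl_cons, List.foldl_nil, List.map_cons, List.map_nil]
    rw [PySem.List.slice_to parts (by positivity : (0:Int) ≤ (m : Int) + 1),
      show ((m : Int) + 1).toNat = m + 1 by omega, List.append_assoc]

-- B's loop invariant: having consumed the nonempty list q, the state is
-- (pvPrefixes q, '/'.join(q)); consuming the rest yields pvPrefixes (q ++ rest).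
theorem pv_b_inv (rest : List String) : ∀ (q : List String), q ≠ [] →
    (rest.foldl
      (fun (st : List String × String) part =>
        let p := if st.1.isEmpty then part else PySem.Str.join "/" [st.2, part]
        (st.1 ++ [p], p))
      (pvPrefixes q, PySem.Str.join "/" q)).1
    = pvPrefixes (q ++ rest) := by
  induction rest with
  | nil => intro q _; simp
  | cons part rest ih =>
    intro q hq
    have hne : (pvPrefixes q).isEmpty = false := by
      have hlen : 0 < q.length := List.length_pos_of_ne_nil hq
      simp only [pvPrefixes, List.isEmpty_eq_false_iff, ne_eq, List.map_eq_nil_iff,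
        List.range_eq_nil]
      omega
    have hstep : pvPrefixes q ++ [PySem.Str.join "/" [PySem.Str.join "/" q, part]]
        = pvPrefixes (q ++ [part]) := by
      rw [pv_str_join_snoc q part hq]
      unfold pvPrefixes
      rw [List.length_append, List.length_singleton, List.range_succ, List.map_append]
      congr 1
      · apply List.map_congr_left
        intro k hk
        rw [List.mem_range] at hk
        rw [List.take_append_of_le_length (by omega)]
      · simp only [List.map_cons, List.map_nil]
        rw [show q.length + 1 = (q ++ [part]).length by simp, List.take_length]
    simp only [List.foldl_cons, hne]
    simp only [Bool.false_eq_true, if_false]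
    rw [show (pvPrefixes q ++ [PySem.Str.join "/" [PySem.Str.join "/" q, part]],
          PySem.Str.join "/" [PySem.Str.join "/" q, part])
        = (pvPrefixes (q ++ [part]), PySem.Str.join "/" (q ++ [part])) by
      rw [← hstep, pv_str_join_snoc q part hq]]
    rw [ih (q ++ [part]) (by simp), List.append_assoc]
    rfl

theorem pv_b_loop (parts : List String) :
    (parts.foldl
      (fun (st : List String × String) part =>
        let p := if st.1.isEmpty then part else PySem.Str.join "/" [st.2, part]
        (st.1 ++ [p], p))
      ([], "")).1 = pvPrefixes parts := by
  cases parts with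
  | nil => simp [pvPrefixes]
  | cons part rest =>
    have h1 : PySem.Str.join "/" [part] = part := by
      apply String.toList_inj.mp
      rw [PySem.Str.toList_join]
      simp only [List.map_cons, List.map_nil, PySem.Chars.join_singleton]
    have h0 : pvPrefixes [part] = [part] := by
      simp [pvPrefixes]
      exact h1
    simp only [List.foldl_cons, List.isEmpty_nil, if_true, List.nil_append]
    rw [show ([part], part) = (pvPrefixes [part], PySem.Str.join "/" [part]) by rw [h0, h1]]
    rw [pv_b_inv rest [part] (by simp)]
    rfl

-- If the separator is not an infix, splitOn returns the whole string.
theorem pv_splitOn_go_no_sep (sep : List Char) (fuel : Nat) :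
    ∀ (l cur : List Char) (acc : List (List Char)), ¬ sep <:+: l → sep ≠ [] →
    PySem.Chars.splitOn.go sep fuel l cur acc = ((cur.reverse ++ l) :: acc).reverse := by
  induction fuel with
  | zero =>
    intro l cur acc _ _
    rw [PySem.Chars.splitOn.go.eq_def]
  | succ m ih =>
    intro l cur acc hinf hsep
    rw [PySem.Chars.splitOn.go.eq_def]
    cases l with
    | nil => simp
    | cons c rest =>
      have hpre : sep.isPrefixOf (c :: rest) = false := by
        rw [Bool.eq_false_iff]
        intro hp
        exact hinf ((List.isPrefixOf_iff_prefix.mp hp).isInfix)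
      simp only [hpre, Bool.false_eq_true, if_false]
      rw [ih rest (c :: cur) acc (fun h => hinf (h.trans (List.suffix_cons c rest).isInfix)) hsep]
      simp

theorem pv_splitOn_no_sep (s sep : List Char) (hinf : ¬ sep <:+: s) (hsep : sep ≠ []) :
    PySem.Chars.splitOn s sep = [s] := by
  unfold PySem.Chars.splitOn
  rw [pv_splitOn_go_no_sep sep _ s [] [] hinf hsep]
  simp

theorem pv_split_no_slash (tag : String) (h : PySem.Str.isIn "/" tag = false) :
    PySem.Str.split? tag "/" = some [tag] := by
  have hch : PySem.Chars.split? tag.toList ['/'] = some [tag.toList] := by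
    unfold PySem.Chars.split?
    rw [if_neg (by simp)]
    rw [pv_splitOn_no_sep tag.toList ['/']
      ((PySem.Chars.isIn_eq_false_iff _ _).mp (by simpa [PySem.Str.isIn_eq] using h)) (by simp)]
  have hmap := PySem.Str.split?_map tag "/"
  rw [show ("/" : String).toList = ['/'] by rfl, hch] at hmap
  cases hsp : PySem.Str.split? tag "/" with
  | none => rw [hsp] at hmap; simp at hmap
  | some l =>
    rw [hsp] at hmap
    simp only [Option.map_some, Option.some.injEq] at hmap
    cases l with
    | nil => simp at hmap
    | cons x r =>
      cases r with
      | nil =>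
        simp only [List.map_cons, List.map_nil, List.cons.injEq, and_true] at hmap
        rw [String.toList_inj.mp hmap]
      | cons y r' => simp at hmap

-- ===== VERDICT (by name: the statement is the Claim_ definition above) =====
theorem parse_tag_hierarchy_py_spec : Claim_equal_parse_tag_hierarchy_py := by
  intro tag _
  unfold Spec_parse_tag_hierarchy_py parse_tag_hierarchy_py parse_tag_hierarchy_py_alt
  by_cases h : PySem.Str.isIn "/" tag = false
  · rw [if_pos h, pv_split_no_slash tag h]
    simp only [Option.getD_some]
    rw [pv_b_loop [tag]]
    simp [pvPrefixes]
    apply String.toList_inj.mp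
    rw [PySem.Str.toList_join]; simp [PySem.Chars.join_singleton]
  · rw [if_neg h]
    simp only
    rw [pv_a_loop, pv_b_loop]
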